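-- pv_equiv track=rewrite | github.com/josecatela/sgcodewars | day13/day13.py | akash_karan_day13
-- ===== SOURCE A (Python) =====
-- def akash_karan_day13(arr):
--     di={"NORTH":1, "WEST":-1j, "SOUTH":-1, "EAST":1j}
--     l,t1=[],0
--     for i in arr:
--         if (t1+di[i]==0):
--             l.pop()                     #if north-south or east-west comes one after another
--             if not(len(l)):t1=0         #then pop the prev and dont add the current
--             else: t1=di[l[-1]]          #update the prev element after pop element
--         else:
--             l.append(i)
--             t1=di[i]
--     return l
-- ===== SOURCE B (Python) =====
-- def akash_karan_day13(arr):
--     opp = {"NORTH": "SOUTH", "SOUTH": "NORTH", "EAST": "WEST", "WEST": "EAST"}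
--     res = list(arr)
--     changed = True
--     while changed:
--         changed = False
--         i = 0
--         while i + 1 < len(res):
--             if res[i + 1] == opp[res[i]]:
--                 del res[i:i + 2]
--                 changed = True
--             else:
--                 i += 1
--     return res
-- ===== Notes on version B (the rewrite author's own statement) =====
-- stated objective: alternative
-- what changed: Replaces A's single-pass stack (with a complex-number marker for the stack top) by a fixpoint reduction: repeatedly scan the list splicing out adjacent opposite pairs until a pass removes nothing.
import Mathlib
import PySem

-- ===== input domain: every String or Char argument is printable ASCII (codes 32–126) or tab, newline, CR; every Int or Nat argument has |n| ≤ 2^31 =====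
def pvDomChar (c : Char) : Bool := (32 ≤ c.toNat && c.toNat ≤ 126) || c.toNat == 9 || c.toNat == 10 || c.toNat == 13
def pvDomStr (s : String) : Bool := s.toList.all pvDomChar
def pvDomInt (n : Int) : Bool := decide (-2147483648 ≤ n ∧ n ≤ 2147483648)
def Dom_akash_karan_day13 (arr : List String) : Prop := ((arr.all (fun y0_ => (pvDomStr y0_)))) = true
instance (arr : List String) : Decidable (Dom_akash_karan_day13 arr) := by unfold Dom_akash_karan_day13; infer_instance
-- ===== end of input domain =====

-- B replaces A's single-pass stack (complex-number top marker) by a fixpoint reduction that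
-- repeatedly splices out adjacent opposite pairs until a pass removes nothing (alternative
-- decomposition, not claimed faster). arr is not mutated by either version.

-- ===== PORT A =====
-- A's dict di maps directions to complex numbers; ported as (re, im) pairs of Int.
-- getD (0,0) is reached only for a key outside the dict (Python: KeyError), excluded by Pre_.
def pvDi (s : String) : Int × Int :=
  (PySem.Dict.get?
    (PySem.Dict.ofList [("NORTH", ((1 : Int), (0 : Int))), ("WEST", (0, -1)),
                        ("SOUTH", (-1, 0)), ("EAST", (0, 1))]) s).getD (0, 0)

-- one iteration of A's for-loop over state (l, t1); t1+di[i]==0 checked componentwise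
def pvAStep (st : List String × (Int × Int)) (i : String) : List String × (Int × Int) :=
  let l := st.1
  let t1 := st.2
  if t1.1 + (pvDi i).1 = 0 ∧ t1.2 + (pvDi i).2 = 0 then
    let l' := l.dropLast                -- l.pop()
    if l'.length = 0 then (l', (0, 0))  -- if not(len(l)): t1 = 0
    else (l', pvDi (l'.getLastD ""))    -- else: t1 = di[l[-1]]
  else (l ++ [i], pvDi i)               -- l.append(i); t1 = di[i]

def akash_karan_day13 (arr : List String) : List String :=
  (arr.foldl pvAStep ([], (0, 0))).1

-- ===== PORT B =====
-- B's opp dict; getD "" is reached only for a key outside the dict (KeyError), excluded by Pre_.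
def pvOpp (s : String) : String :=
  (PySem.Dict.get?
    (PySem.Dict.ofList [("NORTH", "SOUTH"), ("SOUTH", "NORTH"),
                        ("EAST", "WEST"), ("WEST", "EAST")]) s).getD ""

-- B's inner index scan: splice out an adjacent opposite pair and continue at the same index;
-- the Bool is B's 'changed' flag.
def pvOnePass : List String → List String × Bool
  | x :: y :: rest =>
    if y = pvOpp x then ((pvOnePass rest).1, true)
    else
      let r := pvOnePass (y :: rest)
      (x :: r.1, r.2)
  | xs => (xs, false)

theorem pvOnePass_length_le (xs : List String) : (pvOnePass xs).1.length ≤ xs.length := by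
  induction xs using pvOnePass.induct with
  | case1 x rest ih =>
    simp only [pvOnePass, List.length_cons, reduceIte]
    omega
  | case2 x y rest h ih =>
    have hih : (pvOnePass (y :: rest)).1.length ≤ rest.length + 1 := by simpa using ih
    simp only [pvOnePass, if_neg h, List.length_cons]
    omega
  | case3 xs h =>
    rcases xs with _ | ⟨a, _ | ⟨b, r⟩⟩
    · simp [pvOnePass]
    · simp [pvOnePass]
    · exact (h a b r rfl).elim

theorem pvOnePass_lt (xs : List String) (h : (pvOnePass xs).2 = true) :
    (pvOnePass xs).1.length < xs.length := by
  induction xs using pvOnePass.induct with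
  | case1 x rest ih =>
    have := pvOnePass_length_le rest
    simp only [pvOnePass, List.length_cons, reduceIte]
    omega
  | case2 x y rest hc ih =>
    simp only [pvOnePass, if_neg hc, List.length_cons] at h ⊢
    have hih : (pvOnePass (y :: rest)).1.length < rest.length + 1 := by simpa using ih h
    omega
  | case3 xs hx =>
    exfalso
    rcases xs with _ | ⟨a, _ | ⟨b, r⟩⟩
    · simp [pvOnePass] at h
    · simp [pvOnePass] at h
    · exact (hx a b r rfl).elim

-- B's outer while-changed loop
def pvLoop (xs : List String) : List String :=
  let r := pvOnePass xs
  if h : r.2 = true then pvLoop r.1 else r.1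
termination_by xs.length
decreasing_by exact pvOnePass_lt xs h

def akash_karan_day13_alt (arr : List String) : List String :=
  pvLoop arr

-- ===== PRECONDITION & SPEC =====
-- Pre_ excludes inputs containing a string other than the four compass directions:
-- there A raises KeyError (di[i]) and returns nothing.
def Pre_akash_karan_day13 (arr : List String) : Prop :=
  (arr.all (fun s => s = "NORTH" ∨ s = "SOUTH" ∨ s = "EAST" ∨ s = "WEST")) = true
instance (arr : List String) : Decidable (Pre_akash_karan_day13 arr) := by
  unfold Pre_akash_karan_day13; infer_instance

def pvWitness_akash_karan_day13 : List String :=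
  ["NORTH", "SOUTH", "SOUTH", "EAST", "WEST", "NORTH", "WEST"]

def Spec_akash_karan_day13 (arr : List String) (out : List String) : Prop :=
  out = akash_karan_day13_alt arr
instance (arr : List String) (out : List String) : Decidable (Spec_akash_karan_day13 arr out) := by
  unfold Spec_akash_karan_day13; infer_instance

-- ===== CLAIM (what is proved, stated in full; the proofs are below) =====
def Claim_equal_akash_karan_day13 : Prop :=
  ∀ (arr : List String), Dom_akash_karan_day13 arr → Pre_akash_karan_day13 arr →
    Spec_akash_karan_day13 arr (akash_karan_day13 arr)

-- ===== LEMMAS AND PROOFS =====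

-- a valid direction
def GoodS (s : String) : Prop := s = "NORTH" ∨ s = "SOUTH" ∨ s = "EAST" ∨ s = "WEST"

-- reference step: the same stack update on the list alone (top = last element)
def redL (l : List String) (x : String) : List String :=
  if l.getLast? = some (pvOpp x) then l.dropLast else l ++ [x]

-- the t1 value A maintains, as a function of the list
def tInv (l : List String) : Int × Int :=
  match l.getLast? with
  | some a => pvDi a
  | none => (0, 0)

-- no adjacent opposite pair
def Irred (l : List String) : Prop := List.IsChain (fun a b => b ≠ pvOpp a) l

theorem pvOpp_opp {x : String} (hx : GoodS x) : pvOpp (pvOpp x) = x := by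
  rcases hx with h | h | h | h <;> subst h <;> decide

theorem pvDi_zero_iff {a x : String} (ha : GoodS a) (hx : GoodS x) :
    ((pvDi a).1 + (pvDi x).1 = 0 ∧ (pvDi a).2 + (pvDi x).2 = 0) ↔ a = pvOpp x := by
  rcases ha with h | h | h | h <;> subst h <;>
    rcases hx with h | h | h | h <;> subst h <;> decide

theorem pvDi_ne_zero {x : String} (hx : GoodS x) :
    ¬ ((0 : Int) + (pvDi x).1 = 0 ∧ (0 : Int) + (pvDi x).2 = 0) := by
  rcases hx with h | h | h | h <;> subst h <;> decide

theorem tInv_concat (l : List String) (a : String) : tInv (l ++ [a]) = pvDi a := by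
  simp [tInv]

-- A's step equals the reference step, with t1 tracked by tInv
theorem step_eq (l : List String) (x : String) (hx : GoodS x) (hl : ∀ a ∈ l, GoodS a) :
    pvAStep (l, tInv l) x = (redL l x, tInv (redL l x)) := by
  rcases List.eq_nil_or_concat' l with rfl | ⟨L, a, rfl⟩
  · have hC := pvDi_ne_zero hx
    rw [show tInv ([] : List String) = (0, 0) from rfl]
    simp only [pvAStep]
    rw [if_neg hC]
    simp [redL, tInv]
  · have ha : GoodS a := hl a (by simp)
    have htl : tInv (L ++ [a]) = pvDi a := tInv_concat L a
    by_cases hcase : a = pvOpp x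
    · have hcond : (pvDi a).1 + (pvDi x).1 = 0 ∧ (pvDi a).2 + (pvDi x).2 = 0 :=
        (pvDi_zero_iff ha hx).2 hcase
      have hlast : (L ++ [a]).getLast? = some (pvOpp x) := by simp [hcase]
      simp only [pvAStep, htl]
      rw [if_pos hcond]
      rw [redL, if_pos hlast, List.dropLast_concat]
      rcases List.eq_nil_or_concat' L with rfl | ⟨M, b, rfl⟩
      · simp [tInv]
      · simp [tInv, List.getLastD_concat]
    · have hcond : ¬ ((pvDi a).1 + (pvDi x).1 = 0 ∧ (pvDi a).2 + (pvDi x).2 = 0) :=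
        fun hcc => hcase ((pvDi_zero_iff ha hx).1 hcc)
      have hlast : ¬ (L ++ [a]).getLast? = some (pvOpp x) := by simp [hcase]
      simp only [pvAStep, htl]
      rw [if_neg hcond]
      rw [redL, if_neg hlast]
      simp [tInv]

theorem mem_redL {l : List String} {x a : String} (h : a ∈ redL l x) : a ∈ l ∨ a = x := by
  unfold redL at h
  split at h
  · exact Or.inl (List.dropLast_sublist l |>.mem h)
  · rcases List.mem_append.1 h with h | h
    · exact Or.inl h
    · simp at h; exact Or.inr h

-- A's fold equals the reference fold
theorem afold_eq (xs : List String) : ∀ (l : List String),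
    (∀ a ∈ xs, GoodS a) → (∀ a ∈ l, GoodS a) →
    (xs.foldl pvAStep (l, tInv l)).1 = xs.foldl redL l := by
  induction xs with
  | nil => intro l _ _; simp
  | cons x xs ih =>
    intro l hxs hl
    have hx : GoodS x := hxs x (by simp)
    have hl' : ∀ a ∈ redL l x, GoodS a := by
      intro a ha
      rcases mem_redL ha with h | rfl
      · exact hl a h
      · exact hx
    simp only [List.foldl_cons, step_eq l x hx hl]
    exact ih (redL l x) (fun a ha => hxs a (by simp [ha])) hl'

-- the two reference steps with x then (pvOpp x) cancel on an irreducible stack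
theorem redL_redL {s : List String} {x : String} (hs : Irred s)
    (hgs : ∀ a ∈ s, GoodS a) (hx : GoodS x) : redL (redL s x) (pvOpp x) = s := by
  by_cases h : s.getLast? = some (pvOpp x)
  · rcases List.eq_nil_or_concat' s with rfl | ⟨s', a, rfl⟩
    · simp at h
    · rw [List.getLast?_concat] at h
      injection h with h; subst h
      have hdrop : redL (s' ++ [pvOpp x]) x = s' := by
        simp [redL, List.getLast?_concat, List.dropLast_concat]
      rw [hdrop]
      have hne : ¬ s'.getLast? = some (pvOpp (pvOpp x)) := by
        rw [pvOpp_opp hx]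
        intro hlast
        rcases List.eq_nil_or_concat' s' with rfl | ⟨s'', b, rfl⟩
        · simp at hlast
        · rw [List.getLast?_concat] at hlast
          injection hlast with hb
          have hch := (List.isChain_append.1 hs).2.2
          exact hch b (by simp) (pvOpp x) (by simp) (by rw [hb])
      simp [redL, if_neg hne]
  · have hpush : redL s x = s ++ [x] := by simp [redL, if_neg h]
    rw [hpush]
    have hl2 : (s ++ [x]).getLast? = some (pvOpp (pvOpp x)) := by
      rw [pvOpp_opp hx]; simp [List.getLast?_concat]
    simp [redL, hl2, List.dropLast_concat]

theorem mem_onePass {xs : List String} {a : String} (h : a ∈ (pvOnePass xs).1) : a ∈ xs := by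
  induction xs using pvOnePass.induct with
  | case1 x rest ih =>
    simp only [pvOnePass, reduceIte] at h
    simp [ih h]
  | case2 x y rest hc ih =>
    simp only [pvOnePass, if_neg hc] at h
    rcases List.mem_cons.1 h with rfl | h
    · simp
    · simp [ih h]
  | case3 xs hx =>
    rcases xs with _ | ⟨b, _ | ⟨c, r⟩⟩
    · simpa [pvOnePass] using h
    · simpa [pvOnePass] using h
    · exact (hx b c r rfl).elim

-- one inner pass of B preserves the reference fold over any irreducible good stack
theorem foldl_redL_onePass (xs : List String) : ∀ (s : List String),
    (∀ a ∈ xs, GoodS a) → Irred s → (∀ a ∈ s, GoodS a) →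
    List.foldl redL s (pvOnePass xs).1 = List.foldl redL s xs := by
  induction xs using pvOnePass.induct with
  | case1 x rest ih =>
    intro s hg hirr hgs
    have hx : GoodS x := hg x (by simp)
    simp only [pvOnePass, reduceIte]
    rw [ih s (fun a ha => hg a (by simp [ha])) hirr hgs]
    simp only [List.foldl_cons]
    rw [redL_redL hirr hgs hx]
  | case2 x y rest hc ih =>
    intro s hg hirr hgs
    have hx : GoodS x := hg x (by simp)
    simp only [pvOnePass, if_neg hc, List.foldl_cons]
    have hirr' : Irred (redL s x) := by
      unfold redL
      split
      · rcases List.eq_nil_or_concat' s with rfl | ⟨s', b, rfl⟩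
        · simpa using hirr
        · rw [List.dropLast_concat]
          exact (List.isChain_append.1 hirr).1
      · rw [Irred, List.isChain_append]
        refine ⟨hirr, List.isChain_singleton _, ?_⟩
        intro a ha b hb
        simp only [List.head?_cons, Option.mem_def, Option.some.injEq] at hb
        subst hb
        intro hbx
        rename_i hne
        subst hbx
        have hga : GoodS a := hgs a (List.mem_of_getLast? ha)
        exact hne (by rw [Option.mem_def.1 ha, pvOpp_opp hga])
    have hgs' : ∀ a ∈ redL s x, GoodS a := by
      intro a ha
      rcases mem_redL ha with h | rfl
      · exact hgs a h
      · exact hx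
    exact ih (redL s x) (fun a ha => hg a (by simp [ha])) hirr' hgs'
  | case3 xs hx =>
    intro s _ _ _
    rcases xs with _ | ⟨b, _ | ⟨c, r⟩⟩
    · simp [pvOnePass]
    · simp [pvOnePass]
    · exact (hx b c r rfl).elim

-- if B's pass reports no change, the list was already fully reduced
theorem onePass_false {xs : List String} (h : (pvOnePass xs).2 = false) :
    (pvOnePass xs).1 = xs ∧ Irred xs := by
  induction xs using pvOnePass.induct with
  | case1 x rest ih =>
    simp [pvOnePass] at h
  | case2 x y rest hc ih =>
    simp only [pvOnePass, if_neg hc] at h ⊢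
    obtain ⟨h1, h2⟩ := ih h
    refine ⟨by simp [h1], ?_⟩
    rw [Irred, List.isChain_cons_cons]
    exact ⟨fun hyx => hc hyx, h2⟩
  | case3 xs hx =>
    rcases xs with _ | ⟨b, _ | ⟨c, r⟩⟩
    · exact ⟨rfl, List.isChain_nil⟩
    · exact ⟨rfl, List.isChain_singleton b⟩
    · exact (hx b c r rfl).elim

-- the reference fold fixes an irreducible list
theorem foldl_redL_irred (xs : List String) : ∀ (s : List String),
    (∀ a ∈ xs, GoodS a) → Irred (s ++ xs) → List.foldl redL s xs = s ++ xs := by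
  induction xs with
  | nil => intro s _ _; simp
  | cons x xs ih =>
    intro s hg hirr
    have hx : GoodS x := hg x (by simp)
    have hne : ¬ s.getLast? = some (pvOpp x) := by
      intro hlast
      have hch := (List.isChain_append.1 hirr).2.2
      have hcontr := hch (pvOpp x) (by simpa using hlast) x (by simp)
      exact hcontr (by rw [pvOpp_opp hx])
    have hstep : redL s x = s ++ [x] := by simp [redL, if_neg hne]
    simp only [List.foldl_cons, hstep]
    have hsplit : s ++ x :: xs = (s ++ [x]) ++ xs := by simp
    rw [hsplit] at hirr
    rw [show (s ++ [x]) ++ xs = s ++ x :: xs by simp] at hirr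
    have hirr' : Irred ((s ++ [x]) ++ xs) := by rwa [show (s ++ [x]) ++ xs = s ++ x :: xs by simp]
    have := ih (s ++ [x]) (fun a ha => hg a (by simp [ha])) hirr'
    rw [this]; simp

-- B's outer loop computes the reference fold
theorem pvLoop_eq : ∀ (n : ℕ) (xs : List String), xs.length ≤ n →
    (∀ a ∈ xs, GoodS a) → pvLoop xs = List.foldl redL [] xs := by
  intro n
  induction n with
  | zero =>
    intro xs hlen hg
    have hnil : xs = [] := by cases xs <;> simp_all
    subst hnil
    rw [pvLoop]
    simp [pvOnePass]
  | succ n ih =>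
    intro xs hlen hg
    rw [pvLoop]
    by_cases h : (pvOnePass xs).2 = true
    · simp only [dif_pos h]
      have hlt := pvOnePass_lt xs h
      have hg' : ∀ a ∈ (pvOnePass xs).1, GoodS a := fun a ha => hg a (mem_onePass ha)
      rw [ih (pvOnePass xs).1 (by omega) hg']
      exact foldl_redL_onePass xs [] hg List.isChain_nil (by simp)
    · simp only [dif_neg h]
      obtain ⟨h1, h2⟩ := onePass_false (by simpa using h)
      rw [h1]
      exact (foldl_redL_irred xs [] hg (by simpa using h2)).symm

-- ===== VERDICT (by name: the statement is the Claim_ definition above) =====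
theorem akash_karan_day13_spec : Claim_equal_akash_karan_day13 := by
  intro arr _ hpre
  unfold Spec_akash_karan_day13 akash_karan_day13 akash_karan_day13_alt
  have hg : ∀ a ∈ arr, GoodS a := by
    intro a ha
    have := List.all_eq_true.1 hpre a ha
    simpa [GoodS] using this
  have h0 : tInv ([] : List String) = (0, 0) := rfl
  rw [← h0, afold_eq arr [] hg (by simp), pvLoop_eq arr.length arr le_rfl hg]
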